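-- pv_equiv track=rewrite | github.com/rokmcBum/Speech_Clear-BE | app/utils/analyzer_function.py | make_part_index_map
-- ===== SOURCE A (Python) =====
-- def make_part_index_map(segments: list):
--     part_ranges = {}
--     current_part = None
--     start_idx = 0
--
--     for idx, seg in enumerate(segments):
--         part = seg.get("part")
--
--         if current_part is None:
--             # 첫 파트 시작
--             current_part = part
--             start_idx = idx
--         elif part != current_part:
--             # 파트가 바뀌면 구간 저장
--             part_ranges[current_part] = [start_idx, idx - 1]
--             # 새 파트 시작
--             current_part = part
--             start_idx = idx
--
--     # 마지막 파트도 저장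
--     if current_part is not None:
--         part_ranges[current_part] = [start_idx, len(segments) - 1]
--
--     return part_ranges
-- ===== SOURCE B (Python) =====
-- def make_part_index_map(segments: list):
--     parts = [seg.get("part") for seg in segments]
--     n = len(parts)
--     starts = [i for i in range(n) if i == 0 or parts[i] != parts[i - 1]]
--     ends = [i for i in range(n) if i == n - 1 or parts[i + 1] != parts[i]]
--     return {parts[s]: [s, e] for s, e in zip(starts, ends) if parts[s] is not None}
-- ===== Notes on version B (the rewrite author's own statement) =====
-- stated objective: alternative
-- what changed: Replaces A's single-pass current_part/start_idx state machine by a staged declarative computation: extract the part list, compute run-start and run-end index lists by comparing each index with its neighbour, zip them, and build the dict in one comprehension over the (start,end) pairs.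
import Mathlib
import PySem

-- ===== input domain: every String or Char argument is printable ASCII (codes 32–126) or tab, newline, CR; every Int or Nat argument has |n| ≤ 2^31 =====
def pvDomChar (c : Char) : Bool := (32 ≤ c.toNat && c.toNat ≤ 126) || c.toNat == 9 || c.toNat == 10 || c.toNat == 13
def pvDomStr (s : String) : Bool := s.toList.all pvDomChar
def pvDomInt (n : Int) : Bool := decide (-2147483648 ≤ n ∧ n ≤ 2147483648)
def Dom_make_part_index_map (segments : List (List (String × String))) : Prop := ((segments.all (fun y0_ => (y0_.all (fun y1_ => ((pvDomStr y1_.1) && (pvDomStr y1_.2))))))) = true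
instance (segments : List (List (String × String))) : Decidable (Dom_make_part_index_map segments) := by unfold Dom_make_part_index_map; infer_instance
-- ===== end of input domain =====

-- B replaces A's single-pass current_part/start_idx state machine by a staged computation:
-- the part list, then the lists of run-start and run-end indices (each index compared with its
-- neighbour), zipped and turned into the dict by one comprehension.

-- ===== PORT A =====
-- seg.get("part") : first-match lookup on the association list
def pvPartOf (seg : List (String × String)) : Option String :=
  (PySem.Dict.mk seg).get? "part"

-- the for-loop of A: state (part_ranges, current_part, start_idx), idx carried alongside
def pvALoop (d : PySem.Dict String (List Int)) (cp : Option String) (start idx : Int) :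
    List (List (String × String)) → PySem.Dict String (List Int) × Option String × Int
  | [] => (d, cp, start)
  | seg :: rest =>
    let part := pvPartOf seg
    match cp with
    | none => pvALoop d part idx (idx + 1) rest
    | some c =>
      if part ≠ some c then
        pvALoop (d.insert c [start, idx - 1]) part idx (idx + 1) rest
      else
        pvALoop d cp start (idx + 1) rest

def make_part_index_map (segments : List (List (String × String))) : List (String × List Int) :=
  let r := pvALoop PySem.Dict.empty none 0 0 segments
  (match r.2.1 with
   | some c => r.1.insert c [r.2.2, (segments.length : Int) - 1]
   | none => r.1).items

-- ===== PORT B =====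
-- the body of B's dict comprehension: parts[s] is always in range here, so the fall-through
-- arm is reached exactly when parts[s] is None (the comprehension's filter)
def pvBDictStep (parts : List (Option String)) (d : PySem.Dict String (List Int)) (se : Int × Int) :
    PySem.Dict String (List Int) :=
  match PySem.List.pyGet? parts se.1 with
  | some (some p) => d.insert p [se.1, se.2]
  | _ => d

def make_part_index_map_alt (segments : List (List (String × String))) : List (String × List Int) :=
  let parts := segments.map pvPartOf
  let n : Int := (parts.length : Int)
  let starts := (PySem.List.pyRange 0 n).filter
    (fun i => i == 0 || !(PySem.List.pyGet? parts i == PySem.List.pyGet? parts (i - 1)))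
  let ends := (PySem.List.pyRange 0 n).filter
    (fun i => i == n - 1 || !(PySem.List.pyGet? parts (i + 1) == PySem.List.pyGet? parts i))
  ((starts.zip ends).foldl (pvBDictStep parts) PySem.Dict.empty).items

-- ===== PRECONDITION & SPEC =====
def Spec_make_part_index_map (segments : List (List (String × String))) (out : List (String × List Int)) : Prop := out = make_part_index_map_alt segments
instance (segments : List (List (String × String))) (out : List (String × List Int)) : Decidable (Spec_make_part_index_map segments out) := by unfold Spec_make_part_index_map; infer_instance

-- ===== CLAIM (what is proved, stated in full; the proofs are below) =====
def Claim_equal_make_part_index_map : Prop := ∀ (segments : List (List (String × String))), Dom_make_part_index_map segments → Spec_make_part_index_map segments (make_part_index_map segments)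

-- ===== LEMMAS AND PROOFS =====

-- A's loop restated over the list of parts only
def pvALoop' (d : PySem.Dict String (List Int)) (cp : Option String) (start idx : Int) :
    List (Option String) → PySem.Dict String (List Int) × Option String × Int
  | [] => (d, cp, start)
  | part :: rest =>
    match cp with
    | none => pvALoop' d part idx (idx + 1) rest
    | some c =>
      if part ≠ some c then
        pvALoop' (d.insert c [start, idx - 1]) part idx (idx + 1) rest
      else
        pvALoop' d cp start (idx + 1) rest

theorem pvALoop_eq (d : PySem.Dict String (List Int)) (cp : Option String) (start idx : Int) :
    ∀ segs : List (List (String × String)),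
      pvALoop d cp start idx segs = pvALoop' d cp start idx (segs.map pvPartOf)
  | [] => rfl
  | seg :: rest => by
    cases cp with
    | none => simp [pvALoop, pvALoop', pvALoop_eq]
    | some c =>
      by_cases h : pvPartOf seg = some c <;>
        simp [pvALoop, pvALoop', h, pvALoop_eq]

-- the post-loop final save of A
def pvFin (r : PySem.Dict String (List Int) × Option String × Int) (endIdx : Int) :
    PySem.Dict String (List Int) :=
  match r.2.1 with
  | some c => r.1.insert c [r.2.2, endIdx]
  | none => r.1

def pvSave (d : PySem.Dict String (List Int)) (p : Option String) (a b : Int) :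
    PySem.Dict String (List Int) :=
  match p with
  | some c => d.insert c [a, b]
  | none => d

-- run decomposition used by the proofs (length of the leading run equal to p, and the remainder)
def pvTakeRun (p : Option String) : List (Option String) → Nat × List (Option String)
  | [] => (0, [])
  | x :: xs => if x = p then ((pvTakeRun p xs).1 + 1, (pvTakeRun p xs).2) else (0, x :: xs)

theorem pvTakeRun_len (p : Option String) : ∀ xs : List (Option String), (pvTakeRun p xs).2.length ≤ xs.length
  | [] => by simp [pvTakeRun]
  | x :: xs => by
    by_cases h : x = p <;> simp [pvTakeRun, h]
    exact Nat.le_succ_of_le (pvTakeRun_len p xs)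

def pvGroupRuns : List (Option String) → List (Option String × Nat)
  | [] => []
  | x :: xs => (x, (pvTakeRun x xs).1 + 1) :: pvGroupRuns (pvTakeRun x xs).2
termination_by l => l.length
decreasing_by exact Nat.lt_succ_of_le (pvTakeRun_len x xs)

def pvBStep (st : PySem.Dict String (List Int) × Int) (run : Option String × Nat) :
    PySem.Dict String (List Int) × Int :=
  (match run.1 with
   | some p => st.1.insert p [st.2, st.2 + (run.2 : Int) - 1]
   | none => st.1,
   st.2 + (run.2 : Int))

def pvBRuns (d : PySem.Dict String (List Int)) (idx : Int) (runs : List (Option String × Nat)) :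
    PySem.Dict String (List Int) :=
  (runs.foldl pvBStep (d, idx)).1

theorem pvBRuns_cons (d : PySem.Dict String (List Int)) (idx : Int) (x : Option String)
    (m : Nat) (rs : List (Option String × Nat)) :
    pvBRuns d idx ((x, m) :: rs) = pvBRuns (pvSave d x idx (idx + (m : Int) - 1)) (idx + (m : Int)) rs := by
  cases x <;> simp [pvBRuns, pvBStep, pvSave, List.foldl]

theorem pvMain : ∀ xs : List (Option String), ∀ (d : PySem.Dict String (List Int))
    (p : Option String) (start idx : Int),
    pvFin (pvALoop' d p start idx xs) (idx + (xs.length : Int) - 1)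
      = pvBRuns (pvSave d p start (idx + ((pvTakeRun p xs).1 : Int) - 1))
          (idx + ((pvTakeRun p xs).1 : Int)) (pvGroupRuns (pvTakeRun p xs).2)
  | [] => by
    intro d p start idx
    cases p <;> simp [pvALoop', pvTakeRun, pvGroupRuns, pvBRuns, pvFin, pvSave]
  | x :: xs => by
    intro d p start idx
    cases p with
    | none =>
      have ih := pvMain xs d x idx (idx + 1)
      by_cases h : x = none
      · subst h
        simp only [pvALoop', pvTakeRun, if_pos rfl, List.length_cons, pvSave] at ih ⊢
        push_cast at ih ⊢
        ring_nf at ih ⊢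
        exact ih
      · simp only [pvALoop', pvTakeRun, if_neg h, List.length_cons, pvSave] at ih ⊢
        rw [pvGroupRuns, pvBRuns_cons]
        cases x with
        | none => exact absurd rfl h
        | some c =>
          simp only [pvSave] at ih ⊢
          push_cast at ih ⊢
          ring_nf at ih ⊢
          exact ih
    | some c =>
      by_cases h : x = some c
      · subst h
        have ih := pvMain xs d (some c) start (idx + 1)
        simp only [pvALoop', pvTakeRun, if_pos rfl, List.length_cons, pvSave,
          ne_eq, not_true_eq_false, if_neg, ite_false, not_not] at ih ⊢
        push_cast at ih ⊢
        ring_nf at ih ⊢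
        exact ih
      · have ih := pvMain xs (d.insert c [start, idx - 1]) x idx (idx + 1)
        simp only [pvALoop', pvTakeRun, if_neg h, List.length_cons, pvSave,
          ne_eq, if_pos, not_false_eq_true, ite_true] at ih ⊢
        rw [pvGroupRuns, pvBRuns_cons]
        cases x with
        | none =>
          simp only [pvSave] at ih ⊢
          push_cast at ih ⊢
          ring_nf at ih ⊢
          exact ih
        | some c' =>
          simp only [pvSave] at ih ⊢
          rw [if_pos h]
          push_cast at ih ⊢
          ring_nf at ih ⊢
          exact ih

theorem pvTop : ∀ parts : List (Option String),
    pvBRuns PySem.Dict.empty 0 (pvGroupRuns parts)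
      = pvBRuns (pvSave PySem.Dict.empty none 0 (0 + ((pvTakeRun none parts).1 : Int) - 1))
          (0 + ((pvTakeRun none parts).1 : Int)) (pvGroupRuns (pvTakeRun none parts).2)
  | [] => by simp [pvTakeRun, pvSave]
  | x :: xs => by
    by_cases h : x = none
    · subst h
      rw [pvGroupRuns, pvBRuns_cons]
      simp only [pvTakeRun, if_pos rfl, pvSave]
      push_cast
      ring_nf
    · simp [pvTakeRun, h, pvSave]

-- ===== B-side analysis: the boundary filters over a run decomposition =====

def pvP1 (parts : List (Option String)) (i : Nat) : Bool :=
  i == 0 || !(parts[i]? == parts[i - 1]?)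

def pvP2 (parts : List (Option String)) (i : Nat) : Bool :=
  i == parts.length - 1 || !(parts[i + 1]? == parts[i]?)

def pvStarts (parts : List (Option String)) : List Nat :=
  (List.range parts.length).filter (pvP1 parts)

def pvEnds (parts : List (Option String)) : List Nat :=
  (List.range parts.length).filter (pvP2 parts)

-- B's comprehension body on Nat indices, shifted by off
def pvZStep (parts : List (Option String)) (off : Nat) (d : PySem.Dict String (List Int))
    (se : Nat × Nat) : PySem.Dict String (List Int) :=
  match parts[se.1]? with
  | some (some p) => d.insert p [((off + se.1 : Nat) : Int), ((off + se.2 : Nat) : Int)]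
  | _ => d

theorem pvTakeRun_spec (p : Option String) : ∀ xs : List (Option String),
    xs = List.replicate (pvTakeRun p xs).1 p ++ (pvTakeRun p xs).2 ∧
      ∀ q, (pvTakeRun p xs).2.head? = some q → q ≠ p
  | [] => by simp [pvTakeRun]
  | x :: xs => by
    by_cases h : x = p
    · subst h
      have ih := pvTakeRun_spec x xs
      refine ⟨?_, by simpa [pvTakeRun] using ih.2⟩
      simp only [pvTakeRun, if_pos rfl, List.replicate_succ, List.cons_append]
      exact congrArg _ ih.1
    · refine ⟨by simp [pvTakeRun, h], ?_⟩
      simp only [pvTakeRun, if_neg h, List.head?_cons]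
      intro q hq
      injection hq with h2
      subst h2
      exact h

theorem pvFilter_range_eq_single (c m : Nat) (h : c < m) :
    (List.range m).filter (fun i => i == c) = [c] := by
  rw [show (fun i => i == c) = (· == c) from rfl, List.filter_beq,
    List.count_eq_one_of_mem (List.nodup_range) (by simpa using h)]
  rfl

theorem pvStarts_run (t : Nat) (p : Option String) (rest : List (Option String))
    (hr : ∀ q, rest.head? = some q → q ≠ p) :
    pvStarts (List.replicate (t + 1) p ++ rest)
      = 0 :: (pvStarts rest).map (fun j => (t + 1) + j) := by
  have hlen : (List.replicate (t + 1) p ++ rest).length = (t + 1) + rest.length := by simp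
  unfold pvStarts
  rw [hlen, List.range_add, List.filter_append]
  have hpt : ∀ i ∈ List.range (t + 1),
      pvP1 (List.replicate (t + 1) p ++ rest) i = (i == 0) := by
    intro i hi
    rw [List.mem_range] at hi
    by_cases h0 : i = 0
    · subst h0; simp [pvP1]
    · have hgetI : (List.replicate (t + 1) p ++ rest)[i]? = some p := by
        rw [List.getElem?_append_left (by simpa using hi), List.getElem?_replicate, if_pos hi]
      have hgetI1 : (List.replicate (t + 1) p ++ rest)[i - 1]? = some p := by
        rw [List.getElem?_append_left (by simp only [List.length_replicate]; omega),
          List.getElem?_replicate, if_pos (by omega)]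
      simp [pvP1, h0, hgetI, hgetI1]
  have hget : ∀ k : Nat, (List.replicate (t + 1) p ++ rest)[(t + 1) + k]? = rest[k]? := by
    intro k
    rw [List.getElem?_append_right (by simp only [List.length_replicate]; omega)]
    simp
  have hps : ∀ j ∈ List.range rest.length,
      (pvP1 (List.replicate (t + 1) p ++ rest) ∘ ((t + 1) + ·)) j = pvP1 rest j := by
    intro j hj
    rw [List.mem_range] at hj
    by_cases h0 : j = 0
    · subst h0
      obtain ⟨q, rest', rfl⟩ : ∃ q rest', rest = q :: rest' := by
        cases rest with
        | nil => simp at hj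
        | cons a l => exact ⟨a, l, rfl⟩
      have hq : q ≠ p := hr q rfl
      have hcur : (List.replicate (t + 1) p ++ q :: rest')[(t + 1) + 0]? = some q := by
        simpa using hget 0
      have hprev : (List.replicate (t + 1) p ++ q :: rest')[t]? = some p := by
        rw [List.getElem?_append_left (by simp), List.getElem?_replicate, if_pos (by omega)]
      simp [pvP1, Function.comp, hcur, hprev, hq]
    · have e1 := hget j
      have e2 : (List.replicate (t + 1) p ++ rest)[t + j]? = rest[j - 1]? := by
        rw [show t + j = (t + 1) + (j - 1) from by omega]
        exact hget (j - 1)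
      have hz : (t + 1 + j == 0) = false := by simp
      simp [pvP1, Function.comp, e1, e2, h0, hz]
  rw [List.filter_congr hpt, pvFilter_range_eq_single 0 (t + 1) (by omega),
    List.filter_map, List.filter_congr hps]
  rfl

theorem pvEnds_run (t : Nat) (p : Option String) (rest : List (Option String))
    (hr : ∀ q, rest.head? = some q → q ≠ p) :
    pvEnds (List.replicate (t + 1) p ++ rest)
      = t :: (pvEnds rest).map (fun j => (t + 1) + j) := by
  have hlen : (List.replicate (t + 1) p ++ rest).length = (t + 1) + rest.length := by simp
  unfold pvEnds
  rw [hlen, List.range_add, List.filter_append]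
  have hget : ∀ k : Nat, (List.replicate (t + 1) p ++ rest)[(t + 1) + k]? = rest[k]? := by
    intro k
    rw [List.getElem?_append_right (by simp only [List.length_replicate]; omega)]
    simp
  have hpt : ∀ i ∈ List.range (t + 1),
      pvP2 (List.replicate (t + 1) p ++ rest) i = (i == t) := by
    intro i hi
    rw [List.mem_range] at hi
    have hgetI : (List.replicate (t + 1) p ++ rest)[i]? = some p := by
      rw [List.getElem?_append_left (by simpa using hi), List.getElem?_replicate, if_pos hi]
    by_cases h0 : i = t
    · have hEq : (i == t) = true := by simp [h0]
      cases rest with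
      | nil =>
        have hL : (i == (List.replicate (t + 1) p ++ ([] : List (Option String))).length - 1)
            = true := by
          rw [hlen]; simp; omega
        rw [pvP2, hL, hEq]
        simp
      | cons q rest' =>
        have hq : q ≠ p := hr q rfl
        have hnext : (List.replicate (t + 1) p ++ q :: rest')[i + 1]? = some q := by
          rw [show i + 1 = (t + 1) + 0 from by omega]
          simpa using hget 0
        rw [pvP2, hEq]
        simp [hnext, hgetI, hq]
    · have hnext : (List.replicate (t + 1) p ++ rest)[i + 1]? = some p := by
        rw [List.getElem?_append_left (by simp only [List.length_replicate]; omega),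
          List.getElem?_replicate, if_pos (by omega)]
      have hL : (i == (List.replicate (t + 1) p ++ rest).length - 1) = false := by
        rw [hlen]; simp; omega
      rw [pvP2, hL]
      simp [hnext, hgetI, h0]
  have hps : ∀ j ∈ List.range rest.length,
      (pvP2 (List.replicate (t + 1) p ++ rest) ∘ ((t + 1) + ·)) j = pvP2 rest j := by
    intro j hj
    rw [List.mem_range] at hj
    have e1 := hget j
    have e2 : (List.replicate (t + 1) p ++ rest)[(t + 1) + j + 1]? = rest[j + 1]? := by
      rw [show (t + 1) + j + 1 = (t + 1) + (j + 1) from by omega]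
      exact hget (j + 1)
    have hL : ((t + 1) + j == (List.replicate (t + 1) p ++ rest).length - 1)
        = (j == rest.length - 1) := by
      rw [hlen]
      by_cases hk : j = rest.length - 1 <;> simp [hk] <;> omega
    simp only [Function.comp, pvP2, hL, e1, e2]
  rw [List.filter_congr hpt, pvFilter_range_eq_single t (t + 1) (by omega),
    List.filter_map, List.filter_congr hps]
  rfl

theorem pvMainB : ∀ (N : Nat) (parts : List (Option String)), parts.length ≤ N →
    ∀ (off : Nat) (d : PySem.Dict String (List Int)),
    ((pvStarts parts).zip (pvEnds parts)).foldl (pvZStep parts off) d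
      = pvBRuns d (off : Int) (pvGroupRuns parts) := by
  intro N
  induction N with
  | zero =>
    intro parts hp off d
    have h : parts = [] := List.eq_nil_of_length_eq_zero (by omega)
    subst h
    simp [pvStarts, pvEnds, pvGroupRuns, pvBRuns]
  | succ N ih =>
    intro parts hp off d
    cases parts with
    | nil => simp [pvStarts, pvEnds, pvGroupRuns, pvBRuns]
    | cons x xs =>
      obtain ⟨hdec0, hr⟩ := pvTakeRun_spec x xs
      set t := (pvTakeRun x xs).1 with ht
      set rest := (pvTakeRun x xs).2 with hrs
      have hdec : x :: xs = List.replicate (t + 1) x ++ rest := by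
        rw [List.replicate_succ, List.cons_append]; exact congrArg _ hdec0
      have hlenr : rest.length ≤ N := le_trans (pvTakeRun_len x xs) (by simpa using hp)
      rw [pvGroupRuns, pvBRuns_cons, hdec, pvStarts_run t x rest hr, pvEnds_run t x rest hr,
        List.zip_cons_cons, List.foldl_cons]
      have hP0 : (List.replicate (t + 1) x ++ rest)[(0 : Nat)]? = some x := by
        simp [List.replicate_succ]
      have hhead : pvZStep (List.replicate (t + 1) x ++ rest) off d (0, t)
          = pvSave d x (off : Int) ((off : Int) + ((t + 1 : Nat) : Int) - 1) := by
        cases x with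
        | none => simp [pvZStep, pvSave, hP0]
        | some s =>
          have hv : ((off + t : Nat) : Int) = (off : Int) + ((t + 1 : Nat) : Int) - 1 := by
            push_cast; ring
          simp [pvZStep, pvSave, hP0, hv]
      have hshift : ∀ (acc : PySem.Dict String (List Int)),
          ∀ se ∈ (pvStarts rest).zip (pvEnds rest),
          pvZStep (List.replicate (t + 1) x ++ rest) off acc
              (Prod.map (fun j => (t + 1) + j) (fun j => (t + 1) + j) se)
            = pvZStep rest (off + (t + 1)) acc se := by
        intro acc se _
        have hget : (List.replicate (t + 1) x ++ rest)[(t + 1) + se.1]? = rest[se.1]? := by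
          rw [List.getElem?_append_right (by simp only [List.length_replicate]; omega)]
          simp
        cases hc : rest[se.1]? with
        | none => simp [pvZStep, Prod.map, hget, hc]
        | some o =>
          cases o with
          | none => simp [pvZStep, Prod.map, hget, hc]
          | some s =>
            have hv1 : off + ((t + 1) + se.1) = (off + (t + 1)) + se.1 := by omega
            have hv2 : off + ((t + 1) + se.2) = (off + (t + 1)) + se.2 := by omega
            simp [pvZStep, Prod.map, hget, hc, hv1, hv2]
      rw [hhead, List.zip_map, List.foldl_map,
        PySem.List.foldl_congr_mem _ _ (pvZStep rest (off + (t + 1))) _ hshift,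
        ih rest hlenr (off + (t + 1))]
      congr 1

theorem pvAltEq (segments : List (List (String × String))) :
    make_part_index_map_alt segments
      = (pvBRuns PySem.Dict.empty 0 (pvGroupRuns (segments.map pvPartOf))).items := by
  simp only [make_part_index_map_alt]
  have hrange : PySem.List.pyRange 0 ((segments.map pvPartOf).length : Int)
      = (List.range (segments.map pvPartOf).length).map (fun k : Nat => (k : Int)) := by
    rw [PySem.List.pyRange_one]
    simp
  have hS : ((List.range (segments.map pvPartOf).length).map (fun k : Nat => (k : Int))).filter
      (fun i => i == 0 || !(PySem.List.pyGet? (segments.map pvPartOf) i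
        == PySem.List.pyGet? (segments.map pvPartOf) (i - 1)))
      = (pvStarts (segments.map pvPartOf)).map (fun k : Nat => (k : Int)) := by
    rw [List.filter_map]
    congr 1
    apply List.filter_congr
    intro j hj
    rw [List.mem_range] at hj
    by_cases h0 : j = 0
    · subst h0; simp [pvP1]
    · have e2 : ((j : Nat) : Int) - 1 = ((j - 1 : Nat) : Int) := by omega
      have g3 : PySem.List.pyGet? (segments.map pvPartOf) (((j : Nat) : Int) - 1)
          = (segments.map pvPartOf)[j - 1]? := by
        rw [e2]; exact PySem.List.pyGet?_natCast _ _
      have hz : (((j : Nat) : Int) == 0) = (j == 0) := by simp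
      simp [pvP1, Function.comp, g3, PySem.List.pyGet?_natCast, hz]
  have hE : ((List.range (segments.map pvPartOf).length).map (fun k : Nat => (k : Int))).filter
      (fun i => i == ((segments.map pvPartOf).length : Int) - 1
        || !(PySem.List.pyGet? (segments.map pvPartOf) (i + 1)
        == PySem.List.pyGet? (segments.map pvPartOf) i))
      = (pvEnds (segments.map pvPartOf)).map (fun k : Nat => (k : Int)) := by
    rw [List.filter_map]
    congr 1
    apply List.filter_congr
    intro j hj
    rw [List.mem_range] at hj
    simp only [List.length_map] at hj
    have e2 : ((j : Nat) : Int) + 1 = ((j + 1 : Nat) : Int) := by omega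
    have g1 : PySem.List.pyGet? (segments.map pvPartOf) (((j : Nat) : Int) + 1)
        = (segments.map pvPartOf)[j + 1]? := by
      rw [e2]; exact PySem.List.pyGet?_natCast _ _
    have hz : (((j : Nat) : Int) == ((segments.length : Nat) : Int) - 1)
        = (j == segments.length - 1) := by
      have e1 : ((segments.length : Nat) : Int) - 1
          = ((segments.length - 1 : Nat) : Int) := by omega
      rw [e1]
      by_cases hk : j = segments.length - 1 <;> simp [hk]
    simp [pvP2, Function.comp, g1, PySem.List.pyGet?_natCast, hz]
  have hfold : ∀ (acc : PySem.Dict String (List Int)),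
      ∀ se ∈ (pvStarts (segments.map pvPartOf)).zip (pvEnds (segments.map pvPartOf)),
      pvBDictStep (segments.map pvPartOf) acc
          (Prod.map (fun k : Nat => (k : Int)) (fun k : Nat => (k : Int)) se)
        = pvZStep (segments.map pvPartOf) 0 acc se := by
    intro acc se _
    cases hc : (segments.map pvPartOf)[se.1]? with
    | none => simp [pvBDictStep, pvZStep, Prod.map, PySem.List.pyGet?_natCast, hc]
    | some o =>
      cases o <;> simp [pvBDictStep, pvZStep, Prod.map, PySem.List.pyGet?_natCast, hc]
  rw [hrange, hS, hE, List.zip_map, List.foldl_map,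
    PySem.List.foldl_congr_mem _ _ (pvZStep (segments.map pvPartOf) 0) _ hfold,
    pvMainB (segments.map pvPartOf).length (segments.map pvPartOf) le_rfl 0]
  norm_num

-- ===== VERDICT (by name: the statement is the Claim_ definition above) =====
theorem make_part_index_map_spec : Claim_equal_make_part_index_map := by
  intro segments _
  unfold Spec_make_part_index_map make_part_index_map
  rw [pvAltEq]
  have hfin : (pvFin (pvALoop PySem.Dict.empty none 0 0 segments)
      (0 + ((segments.map pvPartOf).length : Int) - 1)).items
      = (match (pvALoop PySem.Dict.empty none 0 0 segments).2.1 with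
         | some c => (pvALoop PySem.Dict.empty none 0 0 segments).1.insert c
             [(pvALoop PySem.Dict.empty none 0 0 segments).2.2, (segments.length : Int) - 1]
         | none => (pvALoop PySem.Dict.empty none 0 0 segments).1).items := by
    simp [pvFin, List.length_map]
  rw [← hfin, pvALoop_eq, pvMain, ← pvTop]
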